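-- pv_equiv track=rewrite | github.com/AlienWu2019/Alien-s-Code | oj系统刷题/未名湖边的烦恼.py | list1
-- ===== SOURCE A (Python) =====
-- def list1(a,b):
--     sum=0
--     if(b==0):
--         sum=1
--     elif(a<b):
--         sum=0
--     else:
--         sum=list1(a-1,b)+list1(a,b-1)
--     return sum
-- ===== SOURCE B (Python) =====
-- def _scan(xs):
--     # prefix sums of xs: returns (list of running sums, final sum)
--     out = []
--     s = 0
--     for x in xs:
--         s += x
--         out.append(s)
--     return out, s
--
-- def list1(a, b):
--     if b == 0:
--         return 1
--     if a < b:
--         return 0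
--     # row-by-row DP: row after j passes holds f(i, j) for i = j..a;
--     # each new row is the prefix sums of the previous row's tail.
--     row = [1] * (a + 1)
--     s = 1
--     for _ in range(b):
--         row, s = _scan(row[1:])
--     return s
-- ===== Notes on version B (the rewrite author's own statement) =====
-- stated objective: alternative
-- what changed: Replaced the exponential two-branch recursion by an iterative row DP: each ballot-table row is computed as the prefix sums of the previous row's tail.
import Mathlib
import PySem

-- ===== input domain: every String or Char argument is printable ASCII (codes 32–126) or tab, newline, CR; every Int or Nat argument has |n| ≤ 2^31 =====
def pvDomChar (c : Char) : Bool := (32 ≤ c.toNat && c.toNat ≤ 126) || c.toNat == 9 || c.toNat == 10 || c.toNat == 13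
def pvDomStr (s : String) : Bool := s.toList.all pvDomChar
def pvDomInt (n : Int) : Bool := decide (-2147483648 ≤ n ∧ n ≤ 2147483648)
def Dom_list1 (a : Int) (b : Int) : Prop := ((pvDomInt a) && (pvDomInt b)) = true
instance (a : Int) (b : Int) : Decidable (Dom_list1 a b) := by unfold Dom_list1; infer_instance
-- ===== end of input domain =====

-- B replaces A's two-branch recursion by an iterative prefix-sum row DP over the ballot table.

-- ===== PORT A =====
-- A's recursion diverges when b < 0 ≤ a - b quadrant; fuel makes the same
-- computation total, and (a+b).toNat + 1 fuel is proved sufficient on Pre_.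
def list1Fuel : Nat → Int → Int → Int
  | 0, _, _ => 0
  | n+1, a, b =>
    if b = 0 then 1
    else if a < b then 0
    else list1Fuel n (a-1) b + list1Fuel n a (b-1)

def list1 (a : Int) (b : Int) : Int := list1Fuel ((a+b).toNat + 1) a b

-- ===== PORT B =====
-- _scan: prefix sums, returning (list of running sums, final sum)
def scanAux : Int → List Int → List Int × Int
  | s, [] => ([], s)
  | s, x :: xs =>
    let r := scanAux (s + x) xs
    ((s + x) :: r.1, r.2)

def list1_alt (a : Int) (b : Int) : Int :=
  if b = 0 then 1
  else if a < b then 0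
  else
    let fin := (PySem.List.pyRange 0 b 1).foldl
      (fun st _ => scanAux 0 (PySem.List.slice st.1 (some 1) none))
      (List.replicate ((a+1).toNat) 1, 1)
    fin.2

-- ===== PRECONDITION & SPEC =====
-- A recurses forever (RecursionError/divergence) when b < 0 ≤ b ≤ a fails, i.e. when b < 0 and a ≥ b; Pre_ keeps exactly the inputs where A returns.
def Pre_list1 (a : Int) (b : Int) : Prop := 0 ≤ b ∨ a < b
instance (a : Int) (b : Int) : Decidable (Pre_list1 a b) := by unfold Pre_list1; infer_instance
def pvWitness_list1 : Int × Int := (5, 3)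

def Spec_list1 (a : Int) (b : Int) (out : Int) : Prop := out = list1_alt a b
instance (a : Int) (b : Int) (out : Int) : Decidable (Spec_list1 a b out) := by unfold Spec_list1; infer_instance

-- ===== CLAIM (what is proved, stated in full; the proofs are below) =====
def Claim_equal_list1 : Prop := ∀ (a : Int) (b : Int), Dom_list1 a b → Pre_list1 a b → Spec_list1 a b (list1 a b)

-- ===== LEMMAS AND PROOFS =====

-- reference ballot function on Nat
def F (a b : Nat) : Int :=
  if b = 0 then 1
  else if a < b then 0
  else F (a-1) b + F a (b-1)
termination_by a + b
decreasing_by all_goals omega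

-- the common value of both programs on Pre_
def Fi (a b : Int) : Int :=
  if b = 0 then 1 else if a < b then 0 else F a.toNat b.toNat

lemma F_zero (a : Nat) : F a 0 = 1 := by rw [F]; simp

lemma F_lt (a b : Nat) (h : a < b) : F a b = 0 := by
  rw [F]; have : b ≠ 0 := by omega
  simp [this, h]

lemma F_step (a b : Nat) (hb : b ≠ 0) (hab : b ≤ a) :
    F a b = F (a-1) b + F a (b-1) := by
  rw [F]; simp [hb, Nat.not_lt.mpr hab]

lemma fuel_eq (n : Nat) : ∀ (a b : Int), Pre_list1 a b → (a+b).toNat < n →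
    list1Fuel n a b = Fi a b := by
  induction n with
  | zero => intro a b _ h; omega
  | succ n ih =>
    intro a b hpre hf
    by_cases hb : b = 0
    · simp [list1Fuel, Fi, hb]
    · by_cases hab : a < b
      · simp [list1Fuel, Fi, hb, hab]
      · have hbpos : 0 < b := by rcases hpre with h | h <;> omega
        have hba : b ≤ a := by omega
        have h1 : list1Fuel n (a-1) b = Fi (a-1) b := by
          apply ih _ _ (Or.inl (by omega)); omega
        have h2 : list1Fuel n a (b-1) = Fi a (b-1) := by
          apply ih _ _ (Or.inl (by omega)); omega
        have hF : F a.toNat b.toNat = F (a.toNat-1) b.toNat + F a.toNat (b.toNat-1) :=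
          F_step _ _ (by omega) (by omega)
        have e1 : Fi (a-1) b = F (a.toNat-1) b.toNat := by
          unfold Fi
          by_cases h : a - 1 < b
          · have hab1 : a.toNat - 1 < b.toNat := by omega
            simp [hb, h, F_lt _ _ hab1]
          · have : (a-1).toNat = a.toNat - 1 := by omega
            simp [hb, h, this]
        have e2 : Fi a (b-1) = F a.toNat (b.toNat-1) := by
          unfold Fi
          by_cases h : b - 1 = 0
          · have : b.toNat - 1 = 0 := by omega
            simp [h, this, F_zero]
          · have hnlt : ¬ a < b - 1 := by omega
            have : (b-1).toNat = b.toNat - 1 := by omega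
            simp [h, hnlt, this]
        simp only [list1Fuel, if_neg hb, if_neg hab, h1, h2, e1, e2]
        unfold Fi
        simp [hb, hab, hF]

lemma list1_eq_Fi (a b : Int) (h : Pre_list1 a b) : list1 a b = Fi a b := by
  unfold list1; exact fuel_eq _ a b h (by omega)

-- B-side: the scan turns one DP row into the next.
lemma map_shift (f : Nat → Int) (n : Nat) :
    (List.range (n+1)).map f = f 0 :: (List.range n).map (fun t => f (t+1)) := by
  rw [List.range_succ_eq_map]
  simp [Function.comp, Nat.succ_eq_add_one]

lemma scanAux_map (j : Nat) : ∀ (n i : Nat), j ≤ i →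
    scanAux (F i (j+1)) ((List.range n).map (fun t => F (i+1+t) j)) =
      ((List.range n).map (fun t => F (i+1+t) (j+1)), F (i+n) (j+1)) := by
  intro n
  induction n with
  | zero => intro i _; simp [scanAux]
  | succ n ih =>
    intro i hij
    have hs : F i (j+1) + F (i+1) j = F (i+1) (j+1) := by
      rw [F_step (i+1) (j+1) (by omega) (by omega)]
      simp
    rw [map_shift (fun t => F (i+1+t) j) n, map_shift (fun t => F (i+1+t) (j+1)) n]
    simp only [scanAux]
    have ht : ((List.range n).map (fun t => F (i+1+(t+1)) j)) =
        (List.range n).map (fun t => F ((i+1)+1+t) j) := by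
      apply List.map_congr_left; intro t _; congr 1; omega
    have hadd : i + 1 + 0 = i + 1 := by omega
    have e2 : F (i+1+n) (j+1) = F (i+(n+1)) (j+1) := by congr 1; omega
    have e3 : ((List.range n).map (fun t => F (i+1+(t+1)) (j+1))) =
        (List.range n).map (fun t => F (i+1+1+t) (j+1)) := by
      apply List.map_congr_left; intro t _; congr 1; omega
    rw [ht, hadd, hs, ih (i+1) (by omega), e3, e2]

def rowF (a' j : Nat) : List Int := (List.range (a'+1-j)).map (fun t => F (j+t) j)

def stepB (st : List Int × Int) : List Int × Int := scanAux 0 st.1.tail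

lemma stepB_inv (a' j : Nat) : stepB (rowF a' j, F a' j) = (rowF a' (j+1), F a' (j+1)) := by
  unfold stepB rowF
  by_cases h : a' + 1 - j = 0
  · have h1 : a' + 1 - (j+1) = 0 := by omega
    have h2 : a' < j + 1 := by omega
    simp [h, h1, scanAux, F_lt a' (j+1) h2]
  · obtain ⟨m, hm⟩ : ∃ m, a' + 1 - j = m + 1 := ⟨a' - j, by omega⟩
    rw [hm, map_shift (fun t => F (j+t) j) m]
    simp only [List.tail_cons]
    have ht : ((List.range m).map (fun t => F (j+(t+1)) j)) =
        (List.range m).map (fun t => F (j+1+t) j) := by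
      apply List.map_congr_left; intro t _; congr 1; omega
    have h0 : (0 : Int) = F j (j+1) := (F_lt j (j+1) (by omega)).symm
    rw [ht, h0, scanAux_map j m j (le_refl j)]
    have hm1 : a' + 1 - (j+1) = m := by omega
    have e : F (j+m) (j+1) = F a' (j+1) := by congr 1; omega
    rw [hm1, e]

lemma stepB_iter (a' : Nat) : ∀ (j : Nat), stepB^[j] (rowF a' 0, F a' 0) = (rowF a' j, F a' j) := by
  intro j
  induction j with
  | zero => rfl
  | succ j ih => rw [Function.iterate_succ_apply', ih, stepB_inv]

lemma foldl_const_iter {α β : Type} (g : β → β) : ∀ (l : List α) (st : β),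
    l.foldl (fun s _ => g s) st = g^[l.length] st := by
  intro l
  induction l with
  | nil => intro st; rfl
  | cons x xs ih =>
    intro st
    simp only [List.foldl_cons, List.length_cons, ih]
    rw [Function.iterate_succ_apply]

lemma rowF_zero (a' : Nat) : rowF a' 0 = List.replicate (a'+1) 1 := by
  unfold rowF
  simp only [Nat.sub_zero]
  rw [List.eq_replicate_iff]
  constructor
  · simp
  · intro x hx
    simp only [List.mem_map] at hx
    obtain ⟨t, _, ht⟩ := hx
    rw [← ht]; simp [F_zero]

lemma alt_eq_Fi (a b : Int) (hbpos : 0 < b) (hba : b ≤ a) : list1_alt a b = Fi a b := by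
  have hb : ¬ b = 0 := by omega
  have hab : ¬ a < b := by omega
  unfold list1_alt Fi
  simp only [if_neg hb, if_neg hab]
  have hslice : ∀ (xs : List Int), PySem.List.slice xs (some 1) none = xs.tail :=
    fun xs => PySem.List.slice_from_one xs
  have hfun : (fun (st : List Int × Int) (_ : Int) =>
      scanAux 0 (PySem.List.slice st.1 (some 1) none)) =
      (fun st _ => stepB st) := by
    funext st x; simp [stepB, hslice]
  rw [hfun, foldl_const_iter stepB]
  have hlen : (PySem.List.pyRange 0 b 1).length = b.toNat := by
    rw [PySem.List.length_pyRange_one]; omega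
  rw [hlen]
  have hrep : (List.replicate ((a+1).toNat) (1:Int), (1:Int)) = (rowF a.toNat 0, F a.toNat 0) := by
    rw [rowF_zero, F_zero]
    congr 2
    omega
  rw [hrep, stepB_iter a.toNat b.toNat]

-- ===== VERDICT (by name: the statement is the Claim_ definition above) =====
theorem list1_spec : Claim_equal_list1 := by
  intro a b _ hpre
  unfold Spec_list1
  rw [list1_eq_Fi a b hpre]
  by_cases hb : b = 0
  · simp [list1_alt, Fi, hb]
  · by_cases hab : a < b
    · simp [list1_alt, Fi, hb, hab]
    · have hbpos : 0 < b := by rcases hpre with h | h <;> omega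
      exact (alt_eq_Fi a b hbpos (by omega)).symm
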